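-- pv_equiv track=rewrite | github.com/osmond-jian/riot_esports_ranking | DataPrep/FeatAggs.py | compute_win_streak
-- ===== SOURCE A (Python) =====
-- def compute_win_streak(series):
--     """Compute the win streak for a given series of wins/losses."""
--     streak = 0
--     streak_list = []
--     for value in series:
--         if value == 1:
--             streak += 1
--         else:
--             streak = 0
--         streak_list.append(streak)
--     return streak_list
-- ===== SOURCE B (Python) =====
-- from itertools import groupby
--
-- def compute_win_streak(series):
--     """Compute the win streak for a given series of wins/losses."""
--     out = []
--     for key, grp in groupby(series, key=lambda v: v == 1):
--         n = sum(1 for _ in grp)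
--         out.extend(range(1, n + 1) if key else [0] * n)
--     return out
-- ===== Notes on version B (the rewrite author's own statement) =====
-- stated objective: alternative
-- what changed: Replaces the per-element running counter with a group-then-expand traversal: itertools.groupby splits the series into maximal runs keyed on value==1, and each run is emitted at once as 1..n (winning run) or n zeros.
import Mathlib
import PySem

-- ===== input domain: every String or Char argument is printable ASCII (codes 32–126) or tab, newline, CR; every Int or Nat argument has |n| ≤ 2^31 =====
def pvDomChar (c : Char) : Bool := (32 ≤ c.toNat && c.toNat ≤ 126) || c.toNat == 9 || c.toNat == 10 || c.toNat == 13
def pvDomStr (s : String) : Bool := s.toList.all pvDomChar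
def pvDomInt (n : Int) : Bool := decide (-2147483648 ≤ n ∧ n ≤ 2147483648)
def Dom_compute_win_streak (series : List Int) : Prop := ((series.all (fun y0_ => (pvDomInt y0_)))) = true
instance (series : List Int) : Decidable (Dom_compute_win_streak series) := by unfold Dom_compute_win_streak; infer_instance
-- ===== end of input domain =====

-- B replaces A's per-element running counter with a group-then-expand pass over maximal runs (itertools.groupby); alternative decomposition, same cost.


-- ===== PORT A =====
-- for value in series: streak updated, appended; state (streak, streak_list)
def compute_win_streak (series : List Int) : List Int :=
  (series.foldl
    (fun (st : Int × List Int) value =>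
      let streak := if value = 1 then st.1 + 1 else (0 : Int)
      (streak, st.2 ++ [streak]))
    (0, [])).2

-- ===== PORT B =====
-- spanKey k l = (length of the maximal prefix of l whose (v == 1) equals k, the rest)
def pvSpanKey (k : Bool) : List Int → Nat × List Int
  | [] => (0, [])
  | v :: rest =>
    if (v = 1 : Bool) = k then
      let p := pvSpanKey k rest
      (p.1 + 1, p.2)
    else (0, v :: rest)

theorem pvSpanKey_len (k : Bool) (l : List Int) : (pvSpanKey k l).2.length ≤ l.length := by
  induction l with
  | nil => simp [pvSpanKey]
  | cons v rest ih =>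
    simp only [pvSpanKey]
    split
    · simpa using Nat.le_succ_of_le ih
    · simp

-- emit one group: ascending 1..n for a winning run, n zeros otherwise
def pvEmit (k : Bool) (n : Nat) : List Int :=
  if k then (List.range n).map (fun i : Nat => (i : Int) + 1) else List.replicate n 0

def compute_win_streak_alt (series : List Int) : List Int :=
  match series with
  | [] => []
  | v :: rest =>
    let k : Bool := (v = 1 : Bool)
    let p := pvSpanKey k rest
    pvEmit k (p.1 + 1) ++ compute_win_streak_alt p.2
termination_by series.length
decreasing_by
  simpa using Nat.lt_succ_of_le (pvSpanKey_len _ rest)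

-- ===== PRECONDITION & SPEC =====
def Spec_compute_win_streak (series : List Int) (out : List Int) : Prop := out = compute_win_streak_alt series
instance (series : List Int) (out : List Int) : Decidable (Spec_compute_win_streak series out) := by unfold Spec_compute_win_streak; infer_instance

-- ===== CLAIM (what is proved, stated in full; the proofs are below) =====
def Claim_equal_compute_win_streak : Prop := ∀ (series : List Int), Dom_compute_win_streak series → Spec_compute_win_streak series (compute_win_streak series)

-- ===== LEMMAS AND PROOFS =====

-- reference recursion: the running-counter semantics
def pvG (s : Int) : List Int → List Int
  | [] => []
  | v :: rest =>
    let s' := if v = 1 then s + 1 else (0 : Int)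
    s' :: pvG s' rest

theorem pvA_foldl (l : List Int) : ∀ (s : Int) (acc : List Int),
    (l.foldl (fun (st : Int × List Int) value =>
        let streak := if value = 1 then st.1 + 1 else (0 : Int)
        (streak, st.2 ++ [streak])) (s, acc)).2 = acc ++ pvG s l := by
  induction l with
  | nil => intro s acc; simp [pvG]
  | cons v rest ih =>
    intro s acc
    simp [List.foldl, pvG, ih]

theorem pvRangeMap (n : Nat) (s : Int) :
    (List.range (n + 1)).map (fun i : Nat => s + ((i : Int) + 1)) =
      (s + 1) :: (List.range n).map (fun i : Nat => (s + 1) + ((i : Int) + 1)) := by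
  rw [List.range_succ_eq_map, List.map_cons, List.map_map]
  congr 1
  simp
  intro a _
  ring

theorem pvG_false (l : List Int) : ∀ n r, pvSpanKey false l = (n, r) →
    pvG 0 l = List.replicate n 0 ++ pvG 0 r := by
  induction l with
  | nil =>
    intro n r h
    simp only [pvSpanKey, Prod.mk.injEq] at h
    obtain ⟨h1, h2⟩ := h
    simp [← h1, ← h2]
  | cons w t ih =>
    intro n r h
    simp only [pvSpanKey] at h
    by_cases hw : w = 1
    · subst hw
      simp only [Prod.mk.injEq, decide_eq_false_iff_not, if_neg, reduceIte,
        decide_true, Bool.true_eq_false] at h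
      obtain ⟨h1, h2⟩ := h
      simp [← h1, ← h2]
    · simp only [hw, decide_false, if_pos, reduceIte, decide_eq_false hw, Prod.mk.injEq] at h
      obtain ⟨h1, h2⟩ := h
      have := ih (pvSpanKey false t).1 (pvSpanKey false t).2 rfl
      simp [pvG, hw, this, ← h1, ← h2, List.replicate_succ]

theorem pvG_true (l : List Int) : ∀ n r, pvSpanKey true l = (n, r) → ∀ s : Int,
    pvG s l = (List.range n).map (fun i : Nat => s + ((i : Int) + 1)) ++ pvG 0 r := by
  induction l with
  | nil =>
    intro n r h s
    simp only [pvSpanKey, Prod.mk.injEq] at h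
    obtain ⟨h1, h2⟩ := h
    simp [← h1, ← h2, pvG]
  | cons w t ih =>
    intro n r h s
    simp only [pvSpanKey] at h
    by_cases hw : w = 1
    · subst hw
      simp only [decide_true, reduceIte, Prod.mk.injEq] at h
      obtain ⟨h1, h2⟩ := h
      have := ih (pvSpanKey true t).1 (pvSpanKey true t).2 rfl (s + 1)
      rw [pvG]
      simp only [reduceIte, this, ← h1, ← h2, pvRangeMap]
      simp
    · simp only [decide_eq_false hw, Bool.false_eq_true, reduceIte, Prod.mk.injEq] at h
      obtain ⟨h1, h2⟩ := h
      rw [← h1, ← h2]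
      simp [pvG, hw]

theorem pvG_eq_alt (l : List Int) : pvG 0 l = compute_win_streak_alt l := by
  match l with
  | [] => simp [pvG, compute_win_streak_alt]
  | v :: rest =>
    have hlen : (pvSpanKey (v = 1 : Bool) rest).2.length < (v :: rest).length :=
      Nat.lt_succ_of_le (pvSpanKey_len _ rest)
    have ih := pvG_eq_alt (pvSpanKey (v = 1 : Bool) rest).2
    rw [compute_win_streak_alt]
    by_cases hv : v = 1
    · subst hv
      have ht := pvG_true rest (pvSpanKey true rest).1 (pvSpanKey true rest).2 rfl 1
      have he : pvEmit true ((pvSpanKey true rest).1 + 1) =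
          1 :: (List.range (pvSpanKey true rest).1).map (fun i : Nat => (1 : Int) + ((i : Int) + 1)) := by
        have h := pvRangeMap (pvSpanKey true rest).1 0
        simp only [zero_add] at h
        simpa [pvEmit] using h
      rw [pvG]
      simp only [reduceIte, zero_add, decide_true, ht, he]
      simp only [decide_true] at ih
      rw [ih]
      simp
    · have ht := pvG_false rest (pvSpanKey false rest).1 (pvSpanKey false rest).2 rfl
      rw [pvG]
      simp only [hv, reduceIte, ht, decide_eq_false hv, pvEmit, Bool.false_eq_true,
        List.replicate_succ]
      simp only [decide_eq_false hv] at ih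
      simp [ih]
termination_by l.length
decreasing_by simpa using Nat.lt_succ_of_le (pvSpanKey_len _ rest)

-- ===== VERDICT (by name: the statement is the Claim_ definition above) =====
theorem compute_win_streak_spec : Claim_equal_compute_win_streak := by
  intro series _
  unfold Spec_compute_win_streak compute_win_streak
  rw [pvA_foldl series 0 [], pvG_eq_alt]
  simp
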